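-- pv_equiv track=rewrite | github.com/jcbarr81/NexGen-BBPro | tests/test_schedule_generator.py | _max_location_blocks
-- ===== SOURCE A (Python) =====
-- from collections import Counter, defaultdict
--
-- def _max_location_blocks(schedule: list[dict[str, str]]) -> tuple[int, int]:
--     """Return the maximum consecutive home and away series for any team."""
--
--     games_by_team: dict[str, list[tuple[str, str, str]]] = defaultdict(list)
--     for game in schedule:
--         date_str = game["date"]
--         home = game["home"]
--         away = game["away"]
--         games_by_team[home].append((date_str, "home", away))
--         games_by_team[away].append((date_str, "away", home))
--
--     max_home_block = 0
--     max_away_block = 0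
--
--     for team, entries in games_by_team.items():
--         entries.sort(key=lambda item: item[0])
--         series: list[tuple[str, str, int]] = []
--         current_loc: str | None = None
--         current_opp: str | None = None
--         current_len = 0
--
--         for _, loc, opp in entries:
--             if loc == current_loc and opp == current_opp:
--                 current_len += 1
--             else:
--                 if current_loc is not None:
--                     series.append((current_loc, current_opp or "", current_len))
--                 current_loc = loc
--                 current_opp = opp
--                 current_len = 1
--         if current_loc is not None:
--             series.append((current_loc, current_opp or "", current_len))
--
--         block = 0
--         for loc, *_ in series:
--             if loc == "home":
--                 block += 1
--                 max_home_block = max(max_home_block, block)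
--             else:
--                 block = 0
--         block = 0
--         for loc, *_ in series:
--             if loc == "away":
--                 block += 1
--                 max_away_block = max(max_away_block, block)
--             else:
--                 block = 0
--
--     return max_home_block, max_away_block
-- ===== SOURCE B (Python) =====
-- from collections import defaultdict
--
-- def _max_location_blocks(schedule):
--     """Return the maximum consecutive home and away series for any team."""
--     games_by_team = defaultdict(list)
--     for game in schedule:
--         date_str = game["date"]
--         home = game["home"]
--         away = game["away"]
--         games_by_team[home].append((date_str, "home", away))
--         games_by_team[away].append((date_str, "away", home))
--
--     max_home = 0
--     max_away = 0
--     for entries in games_by_team.values():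
--         prev = None
--         home_run = 0
--         away_run = 0
--         for _, loc, opp in sorted(entries, key=lambda item: item[0]):
--             if (loc, opp) == prev:
--                 continue  # still inside the same series
--             prev = (loc, opp)
--             if loc == "home":
--                 home_run += 1
--                 away_run = 0
--                 max_home = max(max_home, home_run)
--             else:
--                 away_run += 1
--                 home_run = 0
--                 max_away = max(max_away, away_run)
--     return max_home, max_away
-- ===== Notes on version B (the rewrite author's own statement) =====
-- stated objective: simpler
-- what changed: Instead of materialising an explicit series list per team and scanning it twice (once for home, once for away), B does a single fused pass over each team's date-sorted entries, maintaining the previous (loc, opp) pair and two running block counters, updating the maxima when a new series starts.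
import Mathlib
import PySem

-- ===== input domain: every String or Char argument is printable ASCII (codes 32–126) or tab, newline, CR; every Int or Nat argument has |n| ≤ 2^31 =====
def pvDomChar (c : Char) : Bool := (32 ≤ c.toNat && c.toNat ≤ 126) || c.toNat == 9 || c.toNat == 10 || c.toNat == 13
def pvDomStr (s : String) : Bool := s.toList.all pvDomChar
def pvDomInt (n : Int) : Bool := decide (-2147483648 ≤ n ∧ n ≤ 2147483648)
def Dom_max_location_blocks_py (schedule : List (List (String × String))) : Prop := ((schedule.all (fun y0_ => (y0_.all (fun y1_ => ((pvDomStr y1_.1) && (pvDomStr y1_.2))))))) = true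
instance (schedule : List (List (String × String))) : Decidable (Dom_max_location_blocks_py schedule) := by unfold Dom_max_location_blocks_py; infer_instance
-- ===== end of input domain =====

-- B fuses A's per-team series-list construction and its two scans into one pass with running counters; return values proved equal (no observable mutation: A only sorts its own internal lists).

-- ===== PORT A =====
-- pv_bucket is the games_by_team bucketing loop body; A and B share this Python code verbatim
def pv_bucket (d : PySem.Dict String (List (String × String × String)))
    (g : List (String × String)) : PySem.Dict String (List (String × String × String)) :=
  let date := (List.lookup "date" g).getD ""
  let home := (List.lookup "home" g).getD ""
  let away := (List.lookup "away" g).getD ""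
  let d := PySem.Dict.modify d home [] (fun l => l ++ [(date, "home", away)])
  PySem.Dict.modify d away [] (fun l => l ++ [(date, "away", home)])

def pvA_collect (sa : List (String × String × Int) × Option String × Option String × Int)
    (e : String × String × String) :
    List (String × String × Int) × Option String × Option String × Int :=
  if sa.2.1 == some e.2.1 && sa.2.2.1 == some e.2.2 then
    (sa.1, sa.2.1, sa.2.2.1, sa.2.2.2 + 1)
  else
    ((match sa.2.1 with
      | some cl => sa.1 ++ [(cl, sa.2.2.1.getD "", sa.2.2.2)]
      | none => sa.1), some e.2.1, some e.2.2, 1)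

def pvA_finish (sa : List (String × String × Int) × Option String × Option String × Int) :
    List (String × String × Int) :=
  match sa.2.1 with
  | some cl => sa.1 ++ [(cl, sa.2.2.1.getD "", sa.2.2.2)]
  | none => sa.1

def pvA_scan (tag : String) (m : Int) (series : List (String × String × Int)) : Int :=
  (series.foldl (fun p s => if s.1 == tag then (max p.1 (p.2 + 1), p.2 + 1) else (p.1, 0))
    ((m, 0) : Int × Int)).1

def pvA_team (m : Int × Int) (entries : List (String × String × String)) : Int × Int :=
  let es := PySem.List.sorted entries (fun it => it.1) false
  let series := pvA_finish (es.foldl pvA_collect ([], none, none, 0))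
  (pvA_scan "home" m.1 series, pvA_scan "away" m.2 series)

def max_location_blocks_py (schedule : List (List (String × String))) : Int × Int :=
  (schedule.foldl pv_bucket PySem.Dict.empty).items.foldl (fun m ti => pvA_team m ti.2) (0, 0)

-- ===== PORT B =====
def pvB_step (sb : Option (String × String) × Int × Int × Int × Int)
    (e : String × String × String) : Option (String × String) × Int × Int × Int × Int :=
  if sb.1 == some (e.2.1, e.2.2) then sb
  else if e.2.1 == "home" then
    (some (e.2.1, e.2.2), sb.2.1 + 1, 0, max sb.2.2.2.1 (sb.2.1 + 1), sb.2.2.2.2)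
  else
    (some (e.2.1, e.2.2), 0, sb.2.2.1 + 1, sb.2.2.2.1, max sb.2.2.2.2 (sb.2.2.1 + 1))

def pvB_team (m : Int × Int) (entries : List (String × String × String)) : Int × Int :=
  let st := (PySem.List.sorted entries (fun it => it.1) false).foldl pvB_step
    (none, 0, 0, m.1, m.2)
  (st.2.2.2.1, st.2.2.2.2)

def max_location_blocks_py_alt (schedule : List (List (String × String))) : Int × Int :=
  (schedule.foldl pv_bucket PySem.Dict.empty).values.foldl pvB_team (0, 0)

-- ===== PRECONDITION & SPEC =====
-- Pre_ excludes exactly the games missing one of the keys "date"/"home"/"away", on which Python's game["…"] raises KeyError.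
def Pre_max_location_blocks_py (schedule : List (List (String × String))) : Prop :=
  ∀ g ∈ schedule, "date" ∈ g.map Prod.fst ∧ "home" ∈ g.map Prod.fst ∧ "away" ∈ g.map Prod.fst
instance (schedule : List (List (String × String))) : Decidable (Pre_max_location_blocks_py schedule) := by unfold Pre_max_location_blocks_py; infer_instance
def pvWitness_max_location_blocks_py : (List (List (String × String))) :=
  [[("date", "0401"), ("home", "SEA"), ("away", "NYM")],
   [("date", "0402"), ("home", "SEA"), ("away", "NYM")]]

def Spec_max_location_blocks_py (schedule : List (List (String × String))) (out : Int × Int) : Prop := out = max_location_blocks_py_alt schedule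
instance (schedule : List (List (String × String))) (out : Int × Int) : Decidable (Spec_max_location_blocks_py schedule out) := by unfold Spec_max_location_blocks_py; infer_instance

-- ===== CLAIM (what is proved, stated in full; the proofs are below) =====
def Claim_equal_max_location_blocks_py : Prop := ∀ (schedule : List (List (String × String))), Dom_max_location_blocks_py schedule → Pre_max_location_blocks_py schedule → Spec_max_location_blocks_py schedule (max_location_blocks_py schedule)

-- ===== LEMMAS AND PROOFS =====

-- entries produced by the bucketing loop always carry loc = "home" or "away"
def pvOk (e : String × String × String) : Prop := e.2.1 = "home" ∨ e.2.1 = "away"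

-- the scan step both of A's per-series loops instantiate, lifted to plain loc strings
def pvScan (tag : String) (p : Int × Int) (ls : List String) : Int × Int :=
  ls.foldl (fun p l => if l == tag then (max p.1 (p.2 + 1), p.2 + 1) else (p.1, 0)) p

-- the (loc, opp) pair of A's current open series, as B's `prev`
def pvCurOf (sa : List (String × String × Int) × Option String × Option String × Int) :
    Option (String × String) :=
  match sa.2.1, sa.2.2.1 with
  | some l, some o => some (l, o)
  | _, _ => none

def pvLocs (sa : List (String × String × Int) × Option String × Option String × Int) :
    List String :=
  (pvA_finish sa).map (·.1)

lemma pvScan_append_singleton (tag : String) (p : Int × Int) (ls : List String) (l : String) :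
    pvScan tag p (ls ++ [l]) =
      if l == tag then (max (pvScan tag p ls).1 ((pvScan tag p ls).2 + 1), (pvScan tag p ls).2 + 1)
      else ((pvScan tag p ls).1, 0) := by
  simp [pvScan, List.foldl_append]

lemma pv_core (es : List (String × String × String)) (hok : ∀ e ∈ es, pvOk e)
    (mh ma : Int) :
    ∀ (series : List (String × String × Int)) (cur : Option (String × String)) (len : Int),
    es.foldl pvB_step
      (cur,
       (pvScan "home" (mh, 0) (pvLocs (series, cur.map Prod.fst, cur.map Prod.snd, len))).2,
       (pvScan "away" (ma, 0) (pvLocs (series, cur.map Prod.fst, cur.map Prod.snd, len))).2,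
       (pvScan "home" (mh, 0) (pvLocs (series, cur.map Prod.fst, cur.map Prod.snd, len))).1,
       (pvScan "away" (ma, 0) (pvLocs (series, cur.map Prod.fst, cur.map Prod.snd, len))).1)
    = (pvCurOf (es.foldl pvA_collect (series, cur.map Prod.fst, cur.map Prod.snd, len)),
       (pvScan "home" (mh, 0) (pvLocs (es.foldl pvA_collect (series, cur.map Prod.fst, cur.map Prod.snd, len)))).2,
       (pvScan "away" (ma, 0) (pvLocs (es.foldl pvA_collect (series, cur.map Prod.fst, cur.map Prod.snd, len)))).2,
       (pvScan "home" (mh, 0) (pvLocs (es.foldl pvA_collect (series, cur.map Prod.fst, cur.map Prod.snd, len)))).1,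
       (pvScan "away" (ma, 0) (pvLocs (es.foldl pvA_collect (series, cur.map Prod.fst, cur.map Prod.snd, len)))).1) := by
  induction es with
  | nil => intro series cur len; cases cur <;> simp [pvCurOf]
  | cons e es ih =>
    intro series cur len
    have hoke : pvOk e := hok e (by simp)
    have hok' : ∀ x ∈ es, pvOk x := fun x hx => hok x (by simp [hx])
    rw [List.foldl_cons, List.foldl_cons]
    rcases cur with _ | ⟨l, o⟩
    · -- first entry of the team: a new series opens
      have hA : pvA_collect (series, (none : Option (String × String)).map Prod.fst,
          (none : Option (String × String)).map Prod.snd, len) e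
          = (pvA_finish (series, none, none, len),
             (some (e.2.1, e.2.2)).map Prod.fst, (some (e.2.1, e.2.2)).map Prod.snd, 1) := by
        simp [pvA_collect, pvA_finish]
      have hL : pvLocs (pvA_finish (series, none, none, len),
          (some (e.2.1, e.2.2)).map Prod.fst, (some (e.2.1, e.2.2)).map Prod.snd, 1)
          = pvLocs (series, none, none, len) ++ [e.2.1] := by
        simp [pvLocs, pvA_finish]
      rw [hA]
      have := ih hok' (pvA_finish (series, none, none, len)) (some (e.2.1, e.2.2)) 1
      rw [hL] at this
      rw [← this]
      congr 1
      rcases hoke with h | h <;>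
        simp [pvB_step, pvScan_append_singleton, h]
    · by_cases hsame : l = e.2.1 ∧ o = e.2.2
      · -- same (loc, opp): still inside the current series
        obtain ⟨h1, h2⟩ := hsame; subst h1; subst h2
        have hA : pvA_collect (series, (some (e.2.1, e.2.2)).map Prod.fst,
            (some (e.2.1, e.2.2)).map Prod.snd, len) e
            = (series, (some (e.2.1, e.2.2)).map Prod.fst, (some (e.2.1, e.2.2)).map Prod.snd,
               len + 1) := by
          simp [pvA_collect]
        have hL : pvLocs (series, (some (e.2.1, e.2.2)).map Prod.fst,
            (some (e.2.1, e.2.2)).map Prod.snd, len + 1)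
            = pvLocs (series, (some (e.2.1, e.2.2)).map Prod.fst,
              (some (e.2.1, e.2.2)).map Prod.snd, len) := by
          simp [pvLocs, pvA_finish]
        rw [hA]
        have := ih hok' series (some (e.2.1, e.2.2)) (len + 1)
        rw [hL] at this
        rw [← this]
        congr 1
        simp [pvB_step]
      · -- different (loc, opp): the current series is flushed and a new one opens
        have hA : pvA_collect (series, (some (l, o)).map Prod.fst,
            (some (l, o)).map Prod.snd, len) e
            = (pvA_finish (series, some l, some o, len),
               (some (e.2.1, e.2.2)).map Prod.fst, (some (e.2.1, e.2.2)).map Prod.snd, 1) := by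
          simp only [pvA_collect, Option.map_some]
          rw [if_neg]
          · simp [pvA_finish]
          · simp only [Bool.and_eq_true, beq_iff_eq, Option.some.injEq]
            exact fun h => hsame ⟨h.1, h.2⟩
        have hL : pvLocs (pvA_finish (series, some l, some o, len),
            (some (e.2.1, e.2.2)).map Prod.fst, (some (e.2.1, e.2.2)).map Prod.snd, 1)
            = pvLocs (series, some l, some o, len) ++ [e.2.1] := by
          simp [pvLocs, pvA_finish]
        rw [hA]
        have := ih hok' (pvA_finish (series, some l, some o, len)) (some (e.2.1, e.2.2)) 1
        rw [hL] at this
        rw [← this]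
        congr 1
        have hne : ((some (l, o) : Option (String × String)) == some (e.2.1, e.2.2)) = false := by
          simp only [beq_eq_false_iff_ne, ne_eq, Option.some.injEq, Prod.mk.injEq]
          exact fun h => hsame ⟨h.1, h.2⟩
        rcases hoke with h | h <;>
          simp [pvB_step, pvScan_append_singleton, h] <;>
          exact fun hl ho => hsame ⟨hl.trans h.symm, ho⟩

lemma pv_team_eq (entries : List (String × String × String))
    (hok : ∀ e ∈ entries, pvOk e) (m : Int × Int) :
    pvB_team m entries = pvA_team m entries := by
  have hok' : ∀ e ∈ PySem.List.sorted entries (fun it => it.1) false, pvOk e := by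
    intro e he
    exact hok e ((PySem.List.mem_sorted entries (fun it => it.1) false e).1 he)
  have hcore := pv_core (PySem.List.sorted entries (fun it => it.1) false) hok' m.1 m.2
    [] none 0
  have h0 : pvLocs ([], (none : Option (String × String)).map Prod.fst,
      (none : Option (String × String)).map Prod.snd, 0) = [] := by
    simp [pvLocs, pvA_finish]
  rw [h0] at hcore
  have hscan : ∀ tag mm series, pvA_scan tag mm series = (pvScan tag (mm, 0) (series.map (·.1))).1 := by
    intro tag mm series
    simp [pvA_scan, pvScan, List.foldl_map]
  have e1 : pvScan "home" (m.1, 0) ([] : List String) = (m.1, 0) := rfl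
  have e2 : pvScan "away" (m.2, 0) ([] : List String) = (m.2, 0) := rfl
  rw [e1, e2] at hcore
  simp only [pvB_team, pvA_team]
  rw [hcore, hscan, hscan]
  rfl

lemma pv_bucket_ok (schedule : List (List (String × String)))
    (d : PySem.Dict String (List (String × String × String)))
    (hd : ∀ k, ∀ e ∈ d.getD k [], pvOk e) :
    ∀ k, ∀ e ∈ (schedule.foldl pv_bucket d).getD k [], pvOk e := by
  induction schedule generalizing d with
  | nil => exact hd
  | cons g gs ih =>
    rw [List.foldl_cons]
    apply ih
    intro k e he
    simp only [pv_bucket, PySem.Dict.getD_modify] at he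
    split_ifs at he
    · simp only [List.mem_append, List.mem_singleton] at he
      rcases he with (he | he) | he
      · exact hd _ _ he
      · exact Or.inl (by rw [he])
      · exact Or.inr (by rw [he])
    · simp only [List.mem_append, List.mem_singleton] at he
      rcases he with he | he
      · exact hd _ _ he
      · exact Or.inr (by rw [he])
    · simp only [List.mem_append, List.mem_singleton] at he
      rcases he with he | he
      · exact hd _ _ he
      · exact Or.inl (by rw [he])
    · exact hd _ _ he

lemma pv_bucket_nodup (schedule : List (List (String × String)))
    (d : PySem.Dict String (List (String × String × String)))
    (hd : d.keys.Nodup) :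
    (schedule.foldl pv_bucket d).keys.Nodup := by
  induction schedule generalizing d with
  | nil => exact hd
  | cons g gs ih =>
    rw [List.foldl_cons]
    apply ih
    simp only [pv_bucket]
    rw [PySem.Dict.keys_modify]
    apply PySem.Dict.nodup_keys_insert
    rw [PySem.Dict.keys_modify]
    exact PySem.Dict.nodup_keys_insert _ _ _ hd

-- ===== VERDICT (by name: the statement is the Claim_ definition above) =====
theorem max_location_blocks_py_spec : Claim_equal_max_location_blocks_py := by
  intro schedule _ _
  unfold Spec_max_location_blocks_py
  unfold max_location_blocks_py max_location_blocks_py_alt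
  have hv : (schedule.foldl pv_bucket PySem.Dict.empty).values
      = (schedule.foldl pv_bucket PySem.Dict.empty).items.map Prod.snd := rfl
  rw [hv, List.foldl_map]
  symm
  apply PySem.List.foldl_congr_mem
  intro acc ti hti
  have hnd : (schedule.foldl pv_bucket PySem.Dict.empty).keys.Nodup :=
    pv_bucket_nodup schedule _ PySem.Dict.nodup_keys_empty
  have hok : ∀ e ∈ ti.2, pvOk e := by
    intro e he
    have hgd := PySem.Dict.getD_of_mem_items _ (by exact hti) hnd []
    apply pv_bucket_ok schedule PySem.Dict.empty
      (by intro k e' he'; simp [PySem.Dict.getD_empty] at he') ti.1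
    rw [hgd]
    exact he
  exact pv_team_eq ti.2 hok acc
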